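-- pv_equiv track=rewrite | github.com/sinansoulier/S2SharpAlgo | Algo/TDs/TD1/Enter The Matrix/Recherche_et_test.py | posMinimax
-- ===== SOURCE A (Python) =====
-- def getMaxPos(L):
--     maxPos = 0
--     for i in range(len(L)):
--         if L[i] > L[maxPos]:
--             maxPos = i
--     return maxPos
--
-- def posMinimax(M):
--     if M:
--         x, y = 0, getMaxPos(M[0])
--         for i in range(len(M)):
--             j = getMaxPos(M[i])
--             if M[i][j] < M[x][y]:
--                 x, y = i, j
--         return (x, y)
--     return (-1, -1)
-- ===== SOURCE B (Python) =====
-- def rowBest(row, lo, hi):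
--     # first argmax of row[lo:hi] by divide and conquer; ties go to the left half
--     if hi - lo <= 1:
--         return (row[lo], lo)
--     mid = (lo + hi) // 2
--     left = rowBest(row, lo, mid)
--     right = rowBest(row, mid, hi)
--     return left if left[0] >= right[0] else right
--
-- def best(M, lo, hi):
--     # (min row-max value, its earliest row, that row's first argmax) over rows lo..hi-1
--     if hi - lo <= 1:
--         row = M[lo]
--         v, j = rowBest(row, 0, len(row))
--         return (v, lo, j)
--     mid = (lo + hi) // 2
--     left = best(M, lo, mid)
--     right = best(M, mid, hi)
--     return left if left[0] <= right[0] else right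
--
-- def posMinimax(M):
--     if not M:
--         return (-1, -1)
--     _, x, y = best(M, 0, len(M))
--     return (x, y)
-- ===== Notes on version B (the rewrite author's own statement) =====
-- stated objective: alternative
-- what changed: Replaces A's left-to-right index loops with a divide-and-conquer recursion over index ranges (for both the per-row argmax and the minimum over rows), with left-biased comparisons (>= / <=) at each merge so the first-argmax and earliest-row tie-breaking of A is preserved.
import Mathlib
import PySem

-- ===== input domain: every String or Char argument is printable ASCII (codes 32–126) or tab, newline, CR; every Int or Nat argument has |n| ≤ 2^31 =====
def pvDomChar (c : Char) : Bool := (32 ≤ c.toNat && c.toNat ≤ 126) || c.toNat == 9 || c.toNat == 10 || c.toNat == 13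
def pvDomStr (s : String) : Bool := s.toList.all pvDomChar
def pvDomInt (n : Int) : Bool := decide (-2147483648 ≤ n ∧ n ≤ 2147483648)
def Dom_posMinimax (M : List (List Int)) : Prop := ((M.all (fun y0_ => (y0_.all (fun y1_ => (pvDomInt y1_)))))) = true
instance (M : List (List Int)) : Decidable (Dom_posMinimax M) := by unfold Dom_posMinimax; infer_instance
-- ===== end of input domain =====

-- B replaces A's left-to-right scans by divide-and-conquer over index ranges with left-biased merges (alternative decomposition, same cost).

-- ===== PORT A =====
-- getMaxPos: indices i of range(len L) are always in range, so getD is exact here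
def getMaxPosA (L : List Int) : Nat :=
  (List.range L.length).foldl
    (fun maxPos i => if L.getD i 0 > L.getD maxPos 0 then i else maxPos) 0

def posMinimax (M : List (List Int)) : Int × Int :=
  match M with
  | [] => (-1, -1)
  | r0 :: _ =>
    let y0 := getMaxPosA r0
    let st := (List.range M.length).foldl
      (fun (p : Nat × Nat) i =>
        let j := getMaxPosA (M.getD i [])
        if (M.getD i []).getD j 0 < (M.getD p.1 []).getD p.2 0 then (i, j) else p)
      (0, y0)
    ((st.1 : Int), (st.2 : Int))

-- ===== PORT B =====
-- rowBest(row, lo, hi): divide and conquer first-argmax. Python B recurses on the two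
-- halves of [lo, hi); ported with fuel hi - lo, a pure totality guard (each recursive
-- call acts on a strictly smaller range, so the fuel never runs out and the fuel-0
-- body repeats the base case). Python row[lo] is in range on every reachable call
-- (Pre_ keeps rows nonempty), so getD is exact.
def rowBestGo : Nat → List Int → Nat → Nat → Int × Nat
  | 0, row, lo, _hi => (row.getD lo 0, lo)
  | fuel + 1, row, lo, hi =>
    if hi - lo ≤ 1 then (row.getD lo 0, lo)
    else
      let mid := (lo + hi) / 2
      let l := rowBestGo fuel row lo mid
      let r := rowBestGo fuel row mid hi
      if l.1 ≥ r.1 then l else r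

def rowBestB (row : List Int) (lo hi : Nat) : Int × Nat :=
  rowBestGo (hi - lo) row lo hi

def bestGo : Nat → List (List Int) → Nat → Nat → Int × Nat × Nat
  | 0, M, lo, _hi =>
    let row := M.getD lo []
    let p := rowBestB row 0 row.length
    (p.1, lo, p.2)
  | fuel + 1, M, lo, hi =>
    if hi - lo ≤ 1 then
      let row := M.getD lo []
      let p := rowBestB row 0 row.length
      (p.1, lo, p.2)
    else
      let mid := (lo + hi) / 2
      let l := bestGo fuel M lo mid
      let r := bestGo fuel M mid hi
      if l.1 ≤ r.1 then l else r

def bestB (M : List (List Int)) (lo hi : Nat) : Int × Nat × Nat :=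
  bestGo (hi - lo) M lo hi

def posMinimax_alt (M : List (List Int)) : Int × Int :=
  match M with
  | [] => (-1, -1)
  | _ :: _ =>
    let t := bestB M 0 M.length
    ((t.2.1 : Int), (t.2.2 : Int))

-- ===== PRECONDITION & SPEC =====
-- Pre_ excludes matrices containing an empty row: there A raises IndexError (getMaxPos
-- returns 0 and M[i][0] fails) and B raises IndexError too (row[lo] on the empty row).
def Pre_posMinimax (M : List (List Int)) : Prop := ∀ r ∈ M, r ≠ []
instance (M : List (List Int)) : Decidable (Pre_posMinimax M) := by unfold Pre_posMinimax; infer_instance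
def pvWitness_posMinimax : List (List Int) := [[1, 2], [0, 3]]

def Spec_posMinimax (M : List (List Int)) (out : Int × Int) : Prop := out = posMinimax_alt M
instance (M : List (List Int)) (out : Int × Int) : Decidable (Spec_posMinimax M out) := by unfold Spec_posMinimax; infer_instance

-- ===== CLAIM (what is proved, stated in full; the proofs are below) =====
def Claim_equal_posMinimax : Prop := ∀ (M : List (List Int)), Dom_posMinimax M → Pre_posMinimax M → Spec_posMinimax M (posMinimax M)

-- ===== LEMMAS AND PROOFS =====

-- the i-th row, total
def pvRow (M : List (List Int)) (i : Nat) : List Int := M.getD i []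
-- the row-max value A compares
def pvF (M : List (List Int)) (i : Nat) : Int := (pvRow M i).getD (getMaxPosA (pvRow M i)) 0
-- the index-only fold A's loop computes
def pvG (M : List (List Int)) (x : Nat) (idxs : List Nat) : Nat :=
  idxs.foldl (fun x i => if pvF M i < pvF M x then i else x) x

lemma foldA_eq (M : List (List Int)) (idxs : List Nat) (x : Nat) :
    idxs.foldl
      (fun (p : Nat × Nat) i =>
        let j := getMaxPosA (M.getD i [])
        if (M.getD i []).getD j 0 < (M.getD p.1 []).getD p.2 0 then (i, j) else p)
      (x, getMaxPosA (pvRow M x))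
    = (pvG M x idxs, getMaxPosA (pvRow M (pvG M x idxs))) := by
  induction idxs generalizing x with
  | nil => simp [pvG]
  | cons i t ih =>
    simp only [List.foldl_cons]
    split_ifs with h
    · have h' : pvF M i < pvF M x := h
      rw [show pvG M x (i :: t) = pvG M i t by simp [pvG, h']]
      exact ih i
    · have h' : ¬ pvF M i < pvF M x := h
      rw [show pvG M x (i :: t) = pvG M x t by simp [pvG, h']]
      exact ih x

def pvArgAux (L : List Int) (n : Nat) : Nat :=
  (List.range n).foldl (fun maxPos i => if L.getD i 0 > L.getD maxPos 0 then i else maxPos) 0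

lemma pvArgAux_succ (L : List Int) (n : Nat) :
    pvArgAux L (n + 1) = if L.getD n 0 > L.getD (pvArgAux L n) 0 then n else pvArgAux L n := by
  simp [pvArgAux, List.range_succ]

lemma pvArgAux_spec (L : List Int) (n : Nat) :
    (pvArgAux L n = 0 ∨ pvArgAux L n < n) ∧ (∀ k < n, L.getD k 0 ≤ L.getD (pvArgAux L n) 0) ∧
    (∀ k < pvArgAux L n, L.getD k 0 < L.getD (pvArgAux L n) 0) := by
  induction n with
  | zero => simp [pvArgAux]
  | succ n ih =>
    obtain ⟨h1, h2, h3⟩ := ih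
    rw [pvArgAux_succ]
    by_cases h : L.getD n 0 > L.getD (pvArgAux L n) 0
    · rw [if_pos h]
      refine ⟨Or.inr (Nat.lt_succ_self n), ?_, ?_⟩
      · intro k hk
        rcases Nat.lt_succ_iff_lt_or_eq.mp hk with hk | hk
        · exact le_of_lt (lt_of_le_of_lt (h2 k hk) h)
        · simp [hk]
      · intro k hk
        rcases Nat.lt_trichotomy k (pvArgAux L n) with hc | hc | hc
        · exact lt_trans (h3 k hc) h
        · rw [hc]; exact h
        · exact lt_of_le_of_lt (h2 k hk) h
    · rw [if_neg h]
      refine ⟨?_, ?_, h3⟩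
      · rcases h1 with h1 | h1
        · exact Or.inl h1
        · exact Or.inr (Nat.lt_succ_of_lt h1)
      · intro k hk
        rcases Nat.lt_succ_iff_lt_or_eq.mp hk with hk | hk
        · exact h2 k hk
        · subst hk; exact le_of_not_gt h

-- first argmax is unique (maximal on [0,n), all earlier strictly smaller)
lemma first_argmax_unique (f : Nat → Int) (n i1 i2 : Nat)
    (hi1 : i1 < n) (hi2 : i2 < n)
    (m1 : ∀ k < n, f k ≤ f i1) (m2 : ∀ k < n, f k ≤ f i2)
    (s1 : ∀ k < i1, f k < f i1) (s2 : ∀ k < i2, f k < f i2) : i1 = i2 := by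
  rcases Nat.lt_trichotomy i1 i2 with h | h | h
  · have a1 := s2 i1 h
    have a2 := m2 i1 hi1
    have a3 := m1 i2 hi2
    omega
  · exact h
  · have a1 := s1 i2 h
    have a2 := m1 i2 hi2
    have a3 := m2 i1 hi1
    omega

-- first argmin is unique
lemma first_argmin_unique (f : Nat → Int) (n i1 i2 : Nat)
    (hi1 : i1 < n) (hi2 : i2 < n)
    (m1 : ∀ k < n, f i1 ≤ f k) (m2 : ∀ k < n, f i2 ≤ f k)
    (s1 : ∀ k < i1, f i1 < f k) (s2 : ∀ k < i2, f i2 < f k) : i1 = i2 := by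
  rcases Nat.lt_trichotomy i1 i2 with h | h | h
  · have a1 := s2 i1 h
    have a2 := m2 i1 hi1
    have a3 := m1 i2 hi2
    omega
  · exact h
  · have a1 := s1 i2 h
    have a2 := m1 i2 hi2
    have a3 := m2 i1 hi1
    omega

lemma rowBestGo_spec : ∀ (fuel : Nat) (row : List Int) (lo hi : Nat),
    hi - lo ≤ fuel → lo < hi →
    lo ≤ (rowBestGo fuel row lo hi).2 ∧ (rowBestGo fuel row lo hi).2 < hi ∧
    row.getD (rowBestGo fuel row lo hi).2 0 = (rowBestGo fuel row lo hi).1 ∧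
    (∀ k, lo ≤ k → k < hi → row.getD k 0 ≤ (rowBestGo fuel row lo hi).1) ∧
    (∀ k, lo ≤ k → k < (rowBestGo fuel row lo hi).2 → row.getD k 0 < (rowBestGo fuel row lo hi).1) := by
  intro fuel
  induction fuel with
  | zero => intro row lo hi hf hlh; omega
  | succ n ih =>
    intro row lo hi hf hlh
    by_cases hbase : hi - lo ≤ 1
    · have hred : rowBestGo (n + 1) row lo hi = (row.getD lo 0, lo) := by
        simp only [rowBestGo]
        rw [if_pos hbase]
      rw [hred]
      refine ⟨le_refl lo, hlh, rfl, ?_, ?_⟩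
      · intro k hk1 hk2
        have : k = lo := by omega
        subst this; exact le_refl _
      · intro k hk1 hk2; omega
    · have hred : rowBestGo (n + 1) row lo hi
          = (if (rowBestGo n row lo ((lo + hi) / 2)).1 ≥ (rowBestGo n row ((lo + hi) / 2) hi).1
             then rowBestGo n row lo ((lo + hi) / 2) else rowBestGo n row ((lo + hi) / 2) hi) := by
        simp only [rowBestGo]
        rw [if_neg hbase]
      rw [hred]
      have hmid1 : lo < (lo + hi) / 2 := by omega
      have hmid2 : (lo + hi) / 2 < hi := by omega
      obtain ⟨l1, l2, l3, l4, l5⟩ := ih row lo ((lo + hi) / 2) (by omega) hmid1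
      obtain ⟨r1, r2, r3, r4, r5⟩ := ih row ((lo + hi) / 2) hi (by omega) hmid2
      by_cases hc : (rowBestGo n row lo ((lo + hi) / 2)).1 ≥ (rowBestGo n row ((lo + hi) / 2) hi).1
      · rw [if_pos hc]
        refine ⟨l1, by omega, l3, ?_, ?_⟩
        · intro k hk1 hk2
          by_cases hk : k < (lo + hi) / 2
          · exact l4 k hk1 hk
          · exact le_trans (r4 k (by omega) hk2) hc
        · intro k hk1 hk2
          exact l5 k hk1 hk2
      · rw [if_neg hc]
        have hc : (rowBestGo n row lo ((lo + hi) / 2)).1 < (rowBestGo n row ((lo + hi) / 2) hi).1 :=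
          lt_of_not_ge hc
        refine ⟨by omega, r2, r3, ?_, ?_⟩
        · intro k hk1 hk2
          by_cases hk : k < (lo + hi) / 2
          · exact le_of_lt (lt_of_le_of_lt (l4 k hk1 hk) hc)
          · exact r4 k (by omega) hk2
        · intro k hk1 hk2
          by_cases hk : k < (lo + hi) / 2
          · exact lt_of_le_of_lt (l4 k hk1 hk) hc
          · exact r5 k (by omega) hk2

lemma rowBestB_spec (row : List Int) (lo hi : Nat) (hlh : lo < hi) :
    lo ≤ (rowBestB row lo hi).2 ∧ (rowBestB row lo hi).2 < hi ∧
    row.getD (rowBestB row lo hi).2 0 = (rowBestB row lo hi).1 ∧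
    (∀ k, lo ≤ k → k < hi → row.getD k 0 ≤ (rowBestB row lo hi).1) ∧
    (∀ k, lo ≤ k → k < (rowBestB row lo hi).2 → row.getD k 0 < (rowBestB row lo hi).1) :=
  rowBestGo_spec (hi - lo) row lo hi (le_refl _) hlh

lemma bestGo_spec : ∀ (fuel : Nat) (M : List (List Int)) (lo hi : Nat),
    hi - lo ≤ fuel → lo < hi → hi ≤ M.length → (∀ r ∈ M, r ≠ []) →
    lo ≤ (bestGo fuel M lo hi).2.1 ∧ (bestGo fuel M lo hi).2.1 < hi ∧
    (bestGo fuel M lo hi).1 = pvF M (bestGo fuel M lo hi).2.1 ∧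
    (bestGo fuel M lo hi).2.2 = getMaxPosA (pvRow M (bestGo fuel M lo hi).2.1) ∧
    (∀ k, lo ≤ k → k < hi → (bestGo fuel M lo hi).1 ≤ pvF M k) ∧
    (∀ k, lo ≤ k → k < (bestGo fuel M lo hi).2.1 → (bestGo fuel M lo hi).1 < pvF M k) := by
  intro fuel
  induction fuel with
  | zero => intro M lo hi hf hlh; omega
  | succ n ih =>
    intro M lo hi hf hlh hlen hrows
    by_cases hbase : hi - lo ≤ 1
    · have hred : bestGo (n + 1) M lo hi = ((rowBestB (M.getD lo []) 0 (M.getD lo []).length).1, lo,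
          (rowBestB (M.getD lo []) 0 (M.getD lo []).length).2) := by
        simp only [bestGo]
        rw [if_pos hbase]
      rw [hred]
      have hlo : lo < M.length := by omega
      have hrow_mem : M.getD lo [] ∈ M := by
        rw [List.getD_eq_getElem M [] hlo]
        exact List.getElem_mem hlo
      have hrne : M.getD lo [] ≠ [] := hrows _ hrow_mem
      have hpos : 0 < (M.getD lo []).length := List.length_pos_iff.mpr hrne
      obtain ⟨p1, p2, p3, p4, p5⟩ := rowBestB_spec (M.getD lo []) 0 (M.getD lo []).length hpos
      -- getMaxPosA of this row has the same first-argmax property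
      obtain ⟨q1, q2, q3⟩ := pvArgAux_spec (M.getD lo []) (M.getD lo []).length
      have hq : pvArgAux (M.getD lo []) (M.getD lo []).length < (M.getD lo []).length := by
        rcases q1 with h | h
        · omega
        · exact h
      have hgA : getMaxPosA (M.getD lo []) = pvArgAux (M.getD lo []) (M.getD lo []).length := rfl
      have heq : (rowBestB (M.getD lo []) 0 (M.getD lo []).length).2
          = pvArgAux (M.getD lo []) (M.getD lo []).length := by
        refine first_argmax_unique (fun k => (M.getD lo []).getD k 0) (M.getD lo []).length _ _
          p2 hq ?_ q2 ?_ q3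
        · intro k hk
          show (M.getD lo []).getD k 0 ≤
            (M.getD lo []).getD (rowBestB (M.getD lo []) 0 (M.getD lo []).length).2 0
          rw [p3]
          exact p4 k (Nat.zero_le _) hk
        · intro k hk
          show (M.getD lo []).getD k 0 <
            (M.getD lo []).getD (rowBestB (M.getD lo []) 0 (M.getD lo []).length).2 0
          rw [p3]
          exact p5 k (Nat.zero_le _) hk
      have hval : (rowBestB (M.getD lo []) 0 (M.getD lo []).length).1 = pvF M lo := by
        rw [← p3, heq, pvF, pvRow, hgA]
      refine ⟨le_refl lo, hlh, hval, ?_, ?_, ?_⟩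
      · show (rowBestB (M.getD lo []) 0 (M.getD lo []).length).2 = getMaxPosA (pvRow M lo)
        rw [heq, pvRow, ← hgA]
      · intro k hk1 hk2
        have : k = lo := by omega
        subst this
        rw [hval]
      · intro k hk1 hk2
        have hk3 : k < lo := hk2
        omega
    · have hred : bestGo (n + 1) M lo hi
          = (if (bestGo n M lo ((lo + hi) / 2)).1 ≤ (bestGo n M ((lo + hi) / 2) hi).1
             then bestGo n M lo ((lo + hi) / 2) else bestGo n M ((lo + hi) / 2) hi) := by
        simp only [bestGo]
        rw [if_neg hbase]
      rw [hred]
      have hmid1 : lo < (lo + hi) / 2 := by omega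
      have hmid2 : (lo + hi) / 2 < hi := by omega
      obtain ⟨l1, l2, l3, l4, l5, l6⟩ := ih M lo ((lo + hi) / 2) (by omega) hmid1 (by omega) hrows
      obtain ⟨r1, r2, r3, r4, r5, r6⟩ := ih M ((lo + hi) / 2) hi (by omega) hmid2 hlen hrows
      by_cases hc : (bestGo n M lo ((lo + hi) / 2)).1 ≤ (bestGo n M ((lo + hi) / 2) hi).1
      · rw [if_pos hc]
        refine ⟨l1, by omega, l3, l4, ?_, ?_⟩
        · intro k hk1 hk2
          by_cases hk : k < (lo + hi) / 2
          · exact l5 k hk1 hk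
          · exact le_trans hc (r5 k (by omega) hk2)
        · intro k hk1 hk2
          exact l6 k hk1 hk2
      · rw [if_neg hc]
        have hc : (bestGo n M ((lo + hi) / 2) hi).1 < (bestGo n M lo ((lo + hi) / 2)).1 :=
          lt_of_not_ge hc
        refine ⟨by omega, r2, r3, r4, ?_, ?_⟩
        · intro k hk1 hk2
          by_cases hk : k < (lo + hi) / 2
          · exact le_of_lt (lt_of_lt_of_le hc (l5 k hk1 hk))
          · exact r5 k (by omega) hk2
        · intro k hk1 hk2
          by_cases hk : k < (lo + hi) / 2
          · exact lt_of_lt_of_le hc (l5 k hk1 hk)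
          · exact r6 k (by omega) hk2

lemma bestB_spec (M : List (List Int)) (lo hi : Nat) (hlh : lo < hi) (hlen : hi ≤ M.length)
    (hrows : ∀ r ∈ M, r ≠ []) :
    lo ≤ (bestB M lo hi).2.1 ∧ (bestB M lo hi).2.1 < hi ∧
    (bestB M lo hi).1 = pvF M (bestB M lo hi).2.1 ∧
    (bestB M lo hi).2.2 = getMaxPosA (pvRow M (bestB M lo hi).2.1) ∧
    (∀ k, lo ≤ k → k < hi → (bestB M lo hi).1 ≤ pvF M k) ∧
    (∀ k, lo ≤ k → k < (bestB M lo hi).2.1 → (bestB M lo hi).1 < pvF M k) :=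
  bestGo_spec (hi - lo) M lo hi (le_refl _) hlh hlen hrows

-- A's loop index: fold over range n starting at 0
def pvMinAux (M : List (List Int)) (n : Nat) : Nat :=
  (List.range n).foldl (fun x i => if pvF M i < pvF M x then i else x) 0

lemma pvMinAux_succ (M : List (List Int)) (n : Nat) :
    pvMinAux M (n + 1) = if pvF M n < pvF M (pvMinAux M n) then n else pvMinAux M n := by
  simp [pvMinAux, List.range_succ]

lemma pvMinAux_spec (M : List (List Int)) (n : Nat) :
    (pvMinAux M n = 0 ∨ pvMinAux M n < n) ∧ (∀ k < n, pvF M (pvMinAux M n) ≤ pvF M k) ∧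
    (∀ k < pvMinAux M n, pvF M (pvMinAux M n) < pvF M k) := by
  induction n with
  | zero => simp [pvMinAux]
  | succ n ih =>
    obtain ⟨h1, h2, h3⟩ := ih
    rw [pvMinAux_succ]
    by_cases h : pvF M n < pvF M (pvMinAux M n)
    · rw [if_pos h]
      refine ⟨Or.inr (Nat.lt_succ_self n), ?_, ?_⟩
      · intro k hk
        rcases Nat.lt_succ_iff_lt_or_eq.mp hk with hk | hk
        · exact le_of_lt (lt_of_lt_of_le h (h2 k hk))
        · rw [hk]
      · intro k hk
        rcases Nat.lt_trichotomy k (pvMinAux M n) with hc | hc | hc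
        · exact lt_trans h (h3 k hc)
        · rw [hc]; exact h
        · exact lt_of_lt_of_le h (h2 k hk)
    · rw [if_neg h]
      refine ⟨?_, ?_, h3⟩
      · rcases h1 with h1 | h1
        · exact Or.inl h1
        · exact Or.inr (Nat.lt_succ_of_lt h1)
      · intro k hk
        rcases Nat.lt_succ_iff_lt_or_eq.mp hk with hk | hk
        · exact h2 k hk
        · subst hk; exact le_of_not_gt h

lemma pvG_eq_pvMinAux (M : List (List Int)) (k : Nat) :
    pvG M 0 (List.range' 1 k) = pvMinAux M (k + 1) := by
  have h : List.range (k + 1) = 0 :: List.range' 1 k := by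
    rw [List.range_eq_range', List.range'_succ]
  rw [pvMinAux, h]
  simp [pvG, List.foldl_cons]

-- ===== VERDICT (by name: the statement is the Claim_ definition above) =====
theorem posMinimax_spec : Claim_equal_posMinimax := by
  intro M _ hpre
  unfold Spec_posMinimax
  cases M with
  | nil => rfl
  | cons r0 rest =>
    set M := r0 :: rest with hM
    have hlen : 0 < M.length := by simp [hM]
    -- A side: reduce the pair-fold to pvMinAux
    have hA : posMinimax M
        = ((pvMinAux M M.length : Int), (getMaxPosA (pvRow M (pvMinAux M M.length)) : Int)) := by
      show ((((List.range M.length).foldl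
        (fun (p : Nat × Nat) i =>
          let j := getMaxPosA (M.getD i [])
          if (M.getD i []).getD j 0 < (M.getD p.1 []).getD p.2 0 then (i, j) else p)
        (0, getMaxPosA r0)).1 : Int), _) = _
      have hrange : List.range M.length = 0 :: List.range' 1 rest.length := by
        rw [hM, List.length_cons, List.range_eq_range', List.range'_succ]
      rw [hrange, List.foldl_cons]
      have hstep0 : (let j := getMaxPosA (M.getD 0 [])
          if (M.getD 0 []).getD j 0 < (M.getD ((0 : Nat), getMaxPosA r0).1 []).getD ((0 : Nat), getMaxPosA r0).2 0
          then ((0 : Nat), getMaxPosA (M.getD 0 [])) else ((0 : Nat), getMaxPosA r0))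
          = ((0 : Nat), getMaxPosA (pvRow M 0)) := by
        simp [hM, pvRow]
      rw [hstep0, foldA_eq, pvG_eq_pvMinAux]
      have : rest.length + 1 = M.length := by simp [hM]
      rw [this]
    -- B side: bestB satisfies the first-argmin property, hence picks the same index
    obtain ⟨b1, b2, b3, b4, b5, b6⟩ :=
      bestB_spec M 0 M.length hlen (le_refl _) hpre
    obtain ⟨m1, m2, m3⟩ := pvMinAux_spec M M.length
    have hmlt : pvMinAux M M.length < M.length := by
      rcases m1 with h | h
      · omega
      · exact h
    have hidx : (bestB M 0 M.length).2.1 = pvMinAux M M.length := by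
      refine first_argmin_unique (pvF M) M.length _ _ b2 hmlt ?_ m2 ?_ m3
      · intro k hk
        rw [← b3]
        exact b5 k (Nat.zero_le _) hk
      · intro k hk
        rw [← b3]
        exact b6 k (Nat.zero_le _) hk
    have hB : posMinimax_alt M
        = (((bestB M 0 M.length).2.1 : Int), ((bestB M 0 M.length).2.2 : Int)) := by
      rw [hM]; rfl
    rw [hA, hB, hidx, b4, hidx]
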